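-- pv_equiv track=rewrite | github.com/aditya2785/Hennge-Challenge | main.py | all_valid_ints
-- ===== SOURCE A (Python) =====
-- def all_valid_ints(parts, i):
--     if i >= len(parts):
--         return True
--     p = parts[i]
--     if p.startswith("-"):
--         p = p[1:]
--     if not p.isdigit():
--         return False
--     return all_valid_ints(parts, i + 1)
-- ===== SOURCE B (Python) =====
-- def all_valid_ints(parts, i):
--     for j in range(i, len(parts)):
--         p = parts[j]
--         if p.startswith("-"):
--             p = p[1:]
--         if not p.isdigit():
--             return False
--     return True
-- ===== Notes on version B (the rewrite author's own statement) =====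
-- stated objective: simpler
-- what changed: Replaced A's tail recursion with an iterative for-loop over range(i, len(parts)) with an early return, eliminating the recursion (and Python's recursion-depth limit on long lists).
import Mathlib
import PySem

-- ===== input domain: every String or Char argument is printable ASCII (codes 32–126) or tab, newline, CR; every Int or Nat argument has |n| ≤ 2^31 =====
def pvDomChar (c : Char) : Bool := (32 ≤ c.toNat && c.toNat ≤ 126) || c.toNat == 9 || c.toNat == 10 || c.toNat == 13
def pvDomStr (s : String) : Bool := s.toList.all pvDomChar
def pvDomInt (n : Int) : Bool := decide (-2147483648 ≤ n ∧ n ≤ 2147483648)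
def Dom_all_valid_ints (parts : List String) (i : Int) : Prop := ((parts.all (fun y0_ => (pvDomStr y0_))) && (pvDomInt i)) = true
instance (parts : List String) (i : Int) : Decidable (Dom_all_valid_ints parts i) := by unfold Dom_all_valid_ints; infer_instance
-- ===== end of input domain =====

-- B replaces A's tail recursion with an iterative loop over range(i, len(parts)) with an
-- early return (objective: simpler, no recursion depth limit); same return value on Pre_.

-- ===== PORT A =====
-- shared single-element check: strip one leading '-', then isdigit (identical steps in both Pythons)
def pvCheck (p0 : String) : Bool :=
  let p := if PySem.Str.startswith p0 "-" then PySem.Str.slice p0 (some 1) none else p0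
  PySem.Str.strIsdigit p

def all_valid_ints (parts : List String) (i : Int) : Bool :=
  if _h : (parts.length : Int) ≤ i then true
  else
    match PySem.List.pyGet? parts i with
    | none => false   -- Python raises IndexError here; excluded by Pre_
    | some p0 =>
      if pvCheck p0 then all_valid_ints parts (i + 1) else false
termination_by ((parts.length : Int) - i).toNat
decreasing_by omega

-- ===== PORT B =====
def all_valid_ints_alt (parts : List String) (i : Int) : Bool :=
  (PySem.List.pyRange i (parts.length : Int) 1).all (fun j =>
    match PySem.List.pyGet? parts j with
    | none => false   -- Python raises IndexError here; excluded by Pre_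
    | some p0 => pvCheck p0)

-- ===== PRECONDITION & SPEC =====
-- Pre_ excludes exactly the inputs where Python A raises IndexError: i < -len(parts) with i < len(parts).
def Pre_all_valid_ints (parts : List String) (i : Int) : Prop := -(parts.length : Int) ≤ i
instance (parts : List String) (i : Int) : Decidable (Pre_all_valid_ints parts i) := by unfold Pre_all_valid_ints; infer_instance
def pvWitness_all_valid_ints : List String × Int := (["12", "-3"], 0)

def Spec_all_valid_ints (parts : List String) (i : Int) (out : Bool) : Prop := out = all_valid_ints_alt parts i
instance (parts : List String) (i : Int) (out : Bool) : Decidable (Spec_all_valid_ints parts i out) := by unfold Spec_all_valid_ints; infer_instance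

-- ===== CLAIM (what is proved, stated in full; the proofs are below) =====
def Claim_equal_all_valid_ints : Prop := ∀ (parts : List String) (i : Int), Dom_all_valid_ints parts i → Pre_all_valid_ints parts i → Spec_all_valid_ints parts i (all_valid_ints parts i)

-- ===== LEMMAS AND PROOFS =====

theorem all_valid_ints_eq_alt (parts : List String) (i : Int) :
    all_valid_ints parts i = all_valid_ints_alt parts i := by
  generalize hn : ((parts.length : Int) - i).toNat = n
  induction n generalizing i with
  | zero =>
    have h : (parts.length : Int) ≤ i := by omega
    rw [all_valid_ints, all_valid_ints_alt, PySem.List.pyRange_one_eq_nil h]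
    simp [h]
  | succ n ih =>
    have h : i < (parts.length : Int) := by omega
    rw [all_valid_ints, all_valid_ints_alt, PySem.List.pyRange_one_cons h]
    have hrec := ih (i + 1) (by omega)
    rw [all_valid_ints_alt] at hrec
    simp only [List.all_cons, not_le.mpr h, ← hrec]
    cases PySem.List.pyGet? parts i with
    | none => simp
    | some p0 => by_cases hc : pvCheck p0 <;> simp [hc]

-- ===== VERDICT (by name: the statement is the Claim_ definition above) =====
theorem all_valid_ints_spec : Claim_equal_all_valid_ints := by
  intro parts i _ _
  exact all_valid_ints_eq_alt parts i
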